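-- pv_equiv track=rewrite | github.com/utep-cs-systems-courses/1-shell-maholguin6 | shell-final.py | operator_redirect_read_1
-- ===== SOURCE A (Python) =====
-- def peek_stack(stack):
--
--     if stack:
--         return stack[-1]    # this will get the last element of stack
--     else:
--         return None
--
-- def operator_redirect_read_1(l):
--     args_l_1 = []
--     args_l_2 = []
--     l_a = l.split()
--     prog = list(reversed(l_a))
--     while peek_stack(prog) != None:
--         if peek_stack(prog) != '<':
--             args_l_2.append(prog.pop())
--
--         if peek_stack(prog) == '<':
--             args_l_1 = args_l_2.copy()
--             args_l_2.clear()
--             prog.pop()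
--
--         if peek_stack(prog) == None:
--             return args_l_1, args_l_2
-- ===== SOURCE B (Python) =====
-- def operator_redirect_read_1(l):
--     toks = l.split()
--     if not toks:
--         return None
--     segs = [[]]
--     for t in toks:
--         if t == '<':
--             segs.append([])
--         else:
--             segs[-1].append(t)
--     args_l_1 = segs[-2] if len(segs) >= 2 else []
--     return args_l_1, segs[-1]
-- ===== Notes on version B (the rewrite author's own statement) =====
-- stated objective: simpler
-- what changed: Replaces A's reversed-list peek/pop stack loop that overwrites args_l_1 at each redirect operator with a direct decomposition: group the tokens into operator-delimited segments in one pass, then return the last two segments (second-to-last defaulting to []).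
import Mathlib
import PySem

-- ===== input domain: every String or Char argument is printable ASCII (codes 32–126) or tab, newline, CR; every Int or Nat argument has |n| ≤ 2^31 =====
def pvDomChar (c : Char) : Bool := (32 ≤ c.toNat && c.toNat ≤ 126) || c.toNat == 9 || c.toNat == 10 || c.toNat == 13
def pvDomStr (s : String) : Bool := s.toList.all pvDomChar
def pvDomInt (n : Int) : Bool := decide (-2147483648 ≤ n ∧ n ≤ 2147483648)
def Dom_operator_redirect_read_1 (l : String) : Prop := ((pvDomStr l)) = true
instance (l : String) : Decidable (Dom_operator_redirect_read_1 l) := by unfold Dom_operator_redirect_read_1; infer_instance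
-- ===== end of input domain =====

-- B replaces A's reversed-list peek/pop stack loop with a one-pass grouping of the
-- tokens into '<'-delimited segments, returning the last two segments (simpler decomposition).

-- ===== PORT A =====
-- helper peek_stack: stack[-1] if the stack is truthy, else None
def peekStack (stack : List String) : Option String :=
  if stack ≠ [] then PySem.List.pyGet? stack (-1) else none

-- (cited by aLoop's decreasing_by)
theorem peekStack_some_length_pos {prog : List String} {t : String}
    (h : peekStack prog = some t) : 0 < prog.length := by
  unfold peekStack at h
  split at h
  · next hne => exact List.length_pos_iff.mpr hne
  · simp at h

-- the while-loop of A: prog is the reversed token list, args1/args2 the two accumulators;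
-- the branches follow A's body in order (the append+pop `if`, then the '<' `if`, then the
-- return check); falling out of the loop returns none, as A falls off the function (None).
def aLoop (prog args1 args2 : List String) : Option (List String × List String) :=
  match h : peekStack prog with
  | none => none
  | some t =>
    if t ≠ "<" then
      let args2' := args2 ++ [t]
      let prog' := prog.dropLast
      if peekStack prog' = some "<" then
        let prog'' := prog'.dropLast
        if peekStack prog'' = none then some (args2', []) else aLoop prog'' args2' []
      else
        if peekStack prog' = none then some (args1, args2') else aLoop prog' args1 args2'
    else
      let prog' := prog.dropLast
      if peekStack prog' = none then some (args2, []) else aLoop prog' args2 []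
termination_by prog.length
decreasing_by
  all_goals (have := peekStack_some_length_pos h; simp [List.length_dropLast]; omega)

def operator_redirect_read_1 (l : String) : Option (List String × List String) :=
  let l_a := PySem.Str.split₀ l
  let prog := l_a.reverse
  aLoop prog [] []

-- ===== PORT B =====
-- the body of B's for-loop: extend the last segment, or start a new one on '<'
def pvG (segs : List (List String)) (t : String) : List (List String) :=
  if t = "<" then segs ++ [[]]
  else segs.dropLast ++ [segs.getLastD [] ++ [t]]

def operator_redirect_read_1_alt (l : String) : Option (List String × List String) :=
  let toks := PySem.Str.split₀ l
  if toks = [] then none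
  else
    let segs := toks.foldl pvG [[]]
    let args1 := if 2 ≤ segs.length then (PySem.List.pyGet? segs (-2)).getD [] else []
    some (args1, (PySem.List.pyGet? segs (-1)).getD [])

-- ===== PRECONDITION & SPEC =====
def Spec_operator_redirect_read_1 (l : String) (out : Option (List String × List String)) : Prop := out = operator_redirect_read_1_alt l
instance (l : String) (out : Option (List String × List String)) : Decidable (Spec_operator_redirect_read_1 l out) := by unfold Spec_operator_redirect_read_1; infer_instance

-- ===== CLAIM (what is proved, stated in full; the proofs are below) =====
def Claim_equal_operator_redirect_read_1 : Prop := ∀ (l : String), Dom_operator_redirect_read_1 l → Spec_operator_redirect_read_1 l (operator_redirect_read_1 l)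

-- ===== LEMMAS AND PROOFS =====

-- the common abstract step: the effect of one token on the (args_l_1, args_l_2) state
def pvStep (s : List String × List String) (t : String) : List String × List String :=
  if t = "<" then (s.2, []) else (s.1, s.2 ++ [t])

theorem peekStack_eq_none_iff (prog : List String) : peekStack prog = none ↔ prog = [] := by
  unfold peekStack
  cases prog with
  | nil => simp
  | cons x xs => simp [PySem.List.pyGet?_neg_one]

theorem peekStack_reverse_eq {prog : List String} {t : String}
    (h : peekStack prog = some t) : prog.reverse = t :: prog.dropLast.reverse := by
  have hne : prog ≠ [] := by
    intro hc; subst hc; simp [peekStack] at h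
  unfold peekStack at h
  rw [if_pos hne, PySem.List.pyGet?_neg_one] at h
  have hlast : prog.getLast hne = t := by
    have := List.getLast?_eq_some_getLast (l := prog) hne
    rw [this] at h; exact Option.some.inj h
  conv_lhs => rw [← List.dropLast_concat_getLast hne]
  rw [hlast, List.reverse_append]
  simp

theorem aLoop_eq_foldl (prog args1 args2 : List String) :
    aLoop prog args1 args2 =
      if prog = [] then none
      else some (prog.reverse.foldl pvStep (args1, args2)) := by
  induction prog, args1, args2 using aLoop.induct with
  | case1 prog a1 a2 h =>
    rw [aLoop]
    split
    · rw [peekStack_eq_none_iff] at h; simp [h]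
    · next t h' => rw [h] at h'; exact absurd h' (by simp)
  | case2 prog a1 a2 t h ht p1 h2 p2 h3 =>
    have h2' : peekStack prog.dropLast = some "<" := h2
    have h3' : peekStack prog.dropLast.dropLast = none := h3
    rw [aLoop]
    split
    · next h' => rw [h] at h'; exact absurd h' (by simp)
    · next t' h' =>
      rw [h] at h'; injection h' with h''; subst h''
      rw [if_pos ht, if_pos h2', if_pos h3']
      have hne : prog ≠ [] := by intro hc; subst hc; simp [peekStack] at h
      rw [if_neg hne, peekStack_reverse_eq h, peekStack_reverse_eq h2']
      rw [peekStack_eq_none_iff] at h3'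
      simp [h3', pvStep, ht]
  | case3 prog a1 a2 t h ht a2x p1 h2 p2 h3 ih =>
    have h2' : peekStack prog.dropLast = some "<" := h2
    have h3' : ¬ peekStack prog.dropLast.dropLast = none := h3
    have ih' : aLoop prog.dropLast.dropLast (a2 ++ [t]) [] =
        if prog.dropLast.dropLast = [] then none
        else some (List.foldl pvStep (a2 ++ [t], []) prog.dropLast.dropLast.reverse) := ih
    rw [aLoop]
    split
    · next h' => rw [h] at h'; exact absurd h' (by simp)
    · next t' h' =>
      rw [h] at h'; injection h' with h''; subst h''
      rw [if_pos ht, if_pos h2', if_neg h3', ih']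
      have hne : prog ≠ [] := by intro hc; subst hc; simp [peekStack] at h
      have hne2 : prog.dropLast.dropLast ≠ [] := by
        intro hc; exact h3' (by rw [hc, peekStack_eq_none_iff])
      rw [if_neg hne2, if_neg hne, peekStack_reverse_eq h, peekStack_reverse_eq h2']
      simp [pvStep, ht]
  | case4 prog a1 a2 t h ht p1 h2 h3 =>
    have h2' : ¬ peekStack prog.dropLast = some "<" := h2
    have h3' : peekStack prog.dropLast = none := h3
    rw [aLoop]
    split
    · next h' => rw [h] at h'; exact absurd h' (by simp)
    · next t' h' =>
      rw [h] at h'; injection h' with h''; subst h''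
      rw [if_pos ht, if_neg h2', if_pos h3']
      have hne : prog ≠ [] := by intro hc; subst hc; simp [peekStack] at h
      rw [if_neg hne, peekStack_reverse_eq h]
      rw [peekStack_eq_none_iff] at h3'
      simp [h3', pvStep, ht]
  | case5 prog a1 a2 t h ht a2x p1 h2 h3 ih =>
    have h2' : ¬ peekStack prog.dropLast = some "<" := h2
    have h3' : ¬ peekStack prog.dropLast = none := h3
    have ih' : aLoop prog.dropLast a1 (a2 ++ [t]) =
        if prog.dropLast = [] then none
        else some (List.foldl pvStep (a1, a2 ++ [t]) prog.dropLast.reverse) := ih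
    rw [aLoop]
    split
    · next h' => rw [h] at h'; exact absurd h' (by simp)
    · next t' h' =>
      rw [h] at h'; injection h' with h''; subst h''
      rw [if_pos ht, if_neg h2', if_neg h3', ih']
      have hne : prog ≠ [] := by intro hc; subst hc; simp [peekStack] at h
      have hne2 : prog.dropLast ≠ [] := by
        intro hc; exact h3' (by rw [hc, peekStack_eq_none_iff])
      rw [if_neg hne2, if_neg hne, peekStack_reverse_eq h]
      simp [pvStep, ht]
  | case6 prog a1 a2 t h ht p1 h3 =>
    have h3' : peekStack prog.dropLast = none := h3
    rw [aLoop]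
    split
    · next h' => rw [h] at h'; exact absurd h' (by simp)
    · next t' h' =>
      rw [h] at h'; injection h' with h''; subst h''
      rw [if_neg ht, if_pos h3']
      have hne : prog ≠ [] := by intro hc; subst hc; simp [peekStack] at h
      rw [if_neg hne, peekStack_reverse_eq h]
      rw [peekStack_eq_none_iff] at h3'
      have ht' : t = "<" := by simpa using ht
      simp [h3', pvStep, ht']
  | case7 prog a1 a2 t h ht p1 h3 ih =>
    have h3' : ¬ peekStack prog.dropLast = none := h3
    have ih' : aLoop prog.dropLast a2 [] =
        if prog.dropLast = [] then none
        else some (List.foldl pvStep (a2, []) prog.dropLast.reverse) := ih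
    rw [aLoop]
    split
    · next h' => rw [h] at h'; exact absurd h' (by simp)
    · next t' h' =>
      rw [h] at h'; injection h' with h''; subst h''
      rw [if_neg ht, if_neg h3', ih']
      have hne : prog ≠ [] := by intro hc; subst hc; simp [peekStack] at h
      have hne2 : prog.dropLast ≠ [] := by
        intro hc; exact h3' (by rw [hc, peekStack_eq_none_iff])
      rw [if_neg hne2, if_neg hne, peekStack_reverse_eq h]
      have ht' : t = "<" := by simpa using ht
      simp [pvStep, ht']

-- B-side: the (second-to-last, last) segments of the segment list
def pvPair (segs : List (List String)) : List String × List String :=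
  (if 2 ≤ segs.length then segs.dropLast.getLastD [] else [], segs.getLastD [])

theorem pvG_ne_nil (segs : List (List String)) (t : String) : pvG segs t ≠ [] := by
  unfold pvG; split <;> simp

theorem pvPair_pvG (segs : List (List String)) (hne : segs ≠ []) (t : String) :
    pvPair (pvG segs t) = pvStep (pvPair segs) t := by
  obtain ⟨L, b, rfl⟩ := (List.eq_nil_or_concat segs).resolve_left hne
  simp only [List.concat_eq_append] at *
  unfold pvPair pvG pvStep
  by_cases ht : t = "<" <;>
    simp [ht]

theorem pvFold_pair (toks : List String) (segs : List (List String)) (hne : segs ≠ []) :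
    pvPair (toks.foldl pvG segs) = toks.foldl pvStep (pvPair segs) := by
  induction toks generalizing segs with
  | nil => rfl
  | cons t ts ih =>
    simp only [List.foldl_cons]
    rw [ih (pvG segs t) (pvG_ne_nil segs t), pvPair_pvG segs hne t]

theorem foldl_pvG_ne_nil (toks : List String) (segs : List (List String)) (hne : segs ≠ []) :
    toks.foldl pvG segs ≠ [] := by
  induction toks generalizing segs with
  | nil => exact hne
  | cons t ts ih => exact ih (pvG segs t) (pvG_ne_nil segs t)

-- B's index expressions compute exactly pvPair of the final segment list
theorem pyGet_pair (segs : List (List String)) (hne : segs ≠ []) :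
    ((if 2 ≤ segs.length then (PySem.List.pyGet? segs (-2)).getD [] else []),
      (PySem.List.pyGet? segs (-1)).getD []) = pvPair segs := by
  obtain ⟨L, b, rfl⟩ := (List.eq_nil_or_concat segs).resolve_left hne
  simp only [List.concat_eq_append] at *
  unfold pvPair
  rw [PySem.List.pyGet?_neg_one]
  by_cases hL : L = []
  · subst hL; simp
  · obtain ⟨M, c, rfl⟩ := (List.eq_nil_or_concat L).resolve_left hL
    simp only [List.concat_eq_append] at *
    have h2 : (2 : ℕ) ≤ (M ++ [c] ++ [b]).length := by simp
    rw [if_pos h2, if_pos h2,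
      PySem.List.pyGet?_neg_ofNat (M ++ [c] ++ [b]) 2 (by omega) (by simp)]
    simp

-- ===== VERDICT (by name: the statement is the Claim_ definition above) =====
theorem operator_redirect_read_1_spec : Claim_equal_operator_redirect_read_1 := by
  intro l _
  unfold Spec_operator_redirect_read_1 operator_redirect_read_1 operator_redirect_read_1_alt
  by_cases h : PySem.Str.split₀ l = []
  · simp [h, aLoop_eq_foldl]
  · rw [aLoop_eq_foldl, if_neg (by simpa using h), List.reverse_reverse]
    show some (List.foldl pvStep ([], []) (PySem.Str.split₀ l)) =
      if PySem.Str.split₀ l = [] then none else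
      some ((if 2 ≤ (List.foldl pvG [[]] (PySem.Str.split₀ l)).length then
          (PySem.List.pyGet? (List.foldl pvG [[]] (PySem.Str.split₀ l)) (-2)).getD [] else []),
        (PySem.List.pyGet? (List.foldl pvG [[]] (PySem.Str.split₀ l)) (-1)).getD [])
    have hfin := foldl_pvG_ne_nil (PySem.Str.split₀ l) [[]] (by simp)
    rw [if_neg h, pyGet_pair _ hfin, pvFold_pair _ [[]] (by simp)]
    simp [pvPair]
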